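-- pv_equiv track=rewrite | github.com/rafael-branco/random-coding | ShuffledProperly.py | is_shuffled_well
-- ===== SOURCE A (Python) =====
-- def is_shuffled_well(arr):
--     count = 0
--     check = False
--     temp = []
--     last_result = 0
--     for i in range(0, len(arr)):
--
--         if(i != len(arr)-1):
--             res = arr[i] - arr[i+1]
--
--             if abs(res) == 1 and check and last_result == res:
--                 count += 1
--             elif abs(res) == 1 and not check:
--                 count = 2
--                 check = True
--             elif (last_result == 1 and res == -1) or (last_result == -1 and res == 1):
--                 temp.append(count)
--                 count = 2
--             else:
--                 check = False
--                 temp.append(count)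
--                 count = 0
--
--             last_result = res
--
--     temp.append(count)
--
--     for item in temp:
--         if(item >= 3):
--             return False
--
--     return True
-- ===== SOURCE B (Python) =====
-- def is_shuffled_well(arr):
--     # False exactly when some consecutive triple forms an arithmetic run with step +-1.
--     return all(not (abs(a - b) == 1 and a - b == b - c)
--                for a, b, c in zip(arr, arr[1:], arr[2:]))
-- ===== Notes on version B (the rewrite author's own statement) =====
-- stated objective: simpler
-- what changed: Replaced A's run-length state machine (count/check/temp/last_result accumulated over the diff sequence, then a scan of temp) with a single stateless pass that returns False exactly when some consecutive triple has two equal differences of absolute value 1; the constant-factor speedup comes from dropping the per-step state updates and the temp list.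
import Mathlib
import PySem

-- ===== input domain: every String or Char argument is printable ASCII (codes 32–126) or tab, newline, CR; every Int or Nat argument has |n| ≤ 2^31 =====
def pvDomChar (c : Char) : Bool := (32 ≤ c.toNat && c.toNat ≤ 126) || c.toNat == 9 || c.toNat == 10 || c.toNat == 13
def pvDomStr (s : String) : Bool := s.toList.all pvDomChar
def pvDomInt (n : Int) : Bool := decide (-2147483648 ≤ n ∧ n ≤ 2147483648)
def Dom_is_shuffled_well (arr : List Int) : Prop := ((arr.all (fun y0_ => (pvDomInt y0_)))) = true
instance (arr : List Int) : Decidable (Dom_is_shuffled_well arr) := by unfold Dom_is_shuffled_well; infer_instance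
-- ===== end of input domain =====

-- B replaces A's run-length state machine (count/check/temp/last_result) with a stateless
-- check of every consecutive triple for an arithmetic ±1 step (objective: simpler).

-- ===== PORT A =====
-- loop body of A's `for i in range(0, len(arr))`; state = (count, check, temp, last_result)
def stepA (arr : List Int) (n : Int) (st : Int × Bool × List Int × Int) (i : Int) :
    Int × Bool × List Int × Int :=
  if i ≠ n - 1 then
    let count := st.1
    let check := st.2.1
    let temp := st.2.2.1
    let last := st.2.2.2
    -- indices i and i+1 are in range here (0 ≤ i < n-1), so getD 0 is exact
    let res := ((PySem.List.pyGet? arr i).getD 0) - ((PySem.List.pyGet? arr (i + 1)).getD 0)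
    if res.natAbs = 1 ∧ check = true ∧ last = res then (count + 1, check, temp, res)
    else if res.natAbs = 1 ∧ check = false then (2, true, temp, res)
    else if (last = 1 ∧ res = -1) ∨ (last = -1 ∧ res = 1) then (2, check, temp ++ [count], res)
    else (0, false, temp ++ [count], res)
  else st

def is_shuffled_well (arr : List Int) : Bool :=
  let n : Int := arr.length
  let s := (PySem.List.pyRange 0 n 1).foldl (stepA arr n) (0, false, [], 0)
  let temp := s.2.2.1 ++ [s.1]
  temp.all (fun item => decide (item < 3))

-- ===== PORT B =====
-- Source B: all(not (abs(a-b)==1 and a-b == b-c) for a,b,c in zip(arr, arr[1:], arr[2:]))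
def is_shuffled_well_alt (arr : List Int) : Bool :=
  ((arr.zip (arr.drop 1)).zip (arr.drop 2)).all
    (fun p => !(decide ((p.1.1 - p.1.2).natAbs = 1) && decide (p.1.1 - p.1.2 = p.1.2 - p.2)))

-- ===== PRECONDITION & SPEC =====
def Spec_is_shuffled_well (arr : List Int) (out : Bool) : Prop := out = is_shuffled_well_alt arr
instance (arr : List Int) (out : Bool) : Decidable (Spec_is_shuffled_well arr out) := by unfold Spec_is_shuffled_well; infer_instance

-- ===== CLAIM (what is proved, stated in full; the proofs are below) =====
def Claim_equal_is_shuffled_well : Prop := ∀ (arr : List Int), Dom_is_shuffled_well arr → Spec_is_shuffled_well arr (is_shuffled_well arr)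

-- ===== LEMMAS AND PROOFS =====

-- A's loop body as a function of the current difference only
def stepD (st : Int × Bool × List Int × Int) (res : Int) : Int × Bool × List Int × Int :=
  if res.natAbs = 1 ∧ st.2.1 = true ∧ st.2.2.2 = res then (st.1 + 1, st.2.1, st.2.2.1, res)
  else if res.natAbs = 1 ∧ st.2.1 = false then (2, true, st.2.2.1, res)
  else if (st.2.2.2 = 1 ∧ res = -1) ∨ (st.2.2.2 = -1 ∧ res = 1) then
    (2, st.2.1, st.2.2.1 ++ [st.1], res)
  else (0, false, st.2.2.1 ++ [st.1], res)

-- A's loop as structural recursion on the suffix being processed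
def loopP (s : Int × Bool × List Int × Int) : List Int → Int × Bool × List Int × Int
  | b :: c :: r => loopP (stepD s (b - c)) (c :: r)
  | _ => s

def finishA (s : Int × Bool × List Int × Int) : Bool :=
  (s.2.2.1 ++ [s.1]).all (fun item => decide (item < 3))

-- B as recursion carrying the previous difference
def altD : Int → List Int → Bool
  | d, b :: c :: r => if d.natAbs = 1 ∧ d = b - c then false else altD (b - c) (c :: r)
  | _, _ => true

def mkS (d : Int) (temp : List Int) : Int × Bool × List Int × Int :=
  ((if d.natAbs = 1 then 2 else 0), decide (d.natAbs = 1), temp, d)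

lemma stepA_in_range (arr : List Int) (k : ℕ) (b c : Int) (r : List Int)
    (hd : arr.drop k = b :: c :: r) (s : Int × Bool × List Int × Int) :
    stepA arr arr.length s (k : Int) = stepD s (b - c) := by
  have hk1 : arr[k]? = some b := by
    have h : (arr.drop k)[0]? = arr[k + 0]? := List.getElem?_drop
    rw [hd] at h; simpa using h.symm
  have hk2 : arr[k + 1]? = some c := by
    have h : (arr.drop k)[1]? = arr[k + 1]? := List.getElem?_drop
    rw [hd] at h; simpa using h.symm
  obtain ⟨hlt, -⟩ := List.getElem?_eq_some_iff.mp hk2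
  have hlen : (k : Int) ≠ (arr.length : Int) - 1 := by omega
  have hget1 : PySem.List.pyGet? arr (k : Int) = some b := by
    rw [PySem.List.pyGet?_natCast]; exact hk1
  have hget2 : PySem.List.pyGet? arr ((k : Int) + 1) = some c := by
    have h : ((k : Int) + 1) = ((k + 1 : ℕ) : Int) := by push_cast; ring
    rw [h, PySem.List.pyGet?_natCast]; exact hk2
  simp only [stepA, stepD, hget1, hget2, Option.getD_some]
  rw [if_pos hlen]

lemma stepA_last (arr : List Int) (k : ℕ) (b : Int)
    (hd : arr.drop k = [b]) (s : Int × Bool × List Int × Int) :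
    stepA arr arr.length s (k : Int) = s := by
  have h1 : (arr.drop k).length = arr.length - k := List.length_drop
  rw [hd] at h1
  simp only [List.length_cons, List.length_nil] at h1
  have hcast : (k : Int) = (arr.length : Int) - 1 := by omega
  unfold stepA
  rw [if_neg (not_not_intro hcast)]

lemma bridge (tail : List Int) : ∀ (arr : List Int) (k : ℕ) (s : Int × Bool × List Int × Int),
    arr.drop k = tail →
    (PySem.List.pyRange (k : Int) (arr.length : Int) 1).foldl (stepA arr arr.length) s
      = loopP s tail := by
  induction tail with
  | nil =>
    intro arr k s hd
    have h1 : (arr.drop k).length = arr.length - k := List.length_drop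
    rw [hd] at h1
    simp only [List.length_nil] at h1
    rw [PySem.List.pyRange_one_eq_nil (by omega)]
    rfl
  | cons b tail ih =>
    intro arr k s hd
    have h1 : (arr.drop k).length = arr.length - k := List.length_drop
    rw [hd] at h1
    simp only [List.length_cons] at h1
    have hk : k < arr.length := by omega
    rw [PySem.List.pyRange_one_cons (by omega)]
    have hnext : ((k : Int) + 1) = ((k + 1 : ℕ) : Int) := by push_cast; ring
    cases tail with
    | nil =>
      simp only [List.length_nil] at h1
      rw [List.foldl_cons, stepA_last arr k b hd s, hnext,
        PySem.List.pyRange_one_eq_nil (by omega)]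
      rfl
    | cons c r =>
      have hd' : arr.drop (k + 1) = c :: r := by
        have h : List.drop 1 (List.drop k arr) = List.drop (k + 1) arr := by
          rw [List.drop_drop]
        rw [← h, hd]
        rfl
      rw [List.foldl_cons, stepA_in_range arr k b c r hd s, hnext, ih arr (k + 1) _ hd']
      rfl

def BadS (s : Int × Bool × List Int × Int) : Prop :=
  (3 ≤ s.1 ∧ s.2.1 = true) ∨ ∃ x ∈ s.2.2.1, 3 ≤ x

lemma finish_false (s : Int × Bool × List Int × Int) (h : BadS s) : finishA s = false := by
  unfold finishA
  rw [List.all_eq_false]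
  rcases h with ⟨h1, _⟩ | ⟨x, hx, h3⟩
  · exact ⟨s.1, by simp, by simpa using by omega⟩
  · exact ⟨x, by simp [hx], by simpa using by omega⟩

lemma sticky_step (s : Int × Bool × List Int × Int) (res : Int) (h : BadS s) :
    BadS (stepD s res) := by
  unfold stepD
  rcases h with ⟨h1, h2⟩ | ⟨x, hx, h3⟩
  · split_ifs with c1 c2 c3
    · exact Or.inl ⟨by omega, h2⟩
    · exact absurd c2.2 (by simp [h2])
    · exact Or.inr ⟨s.1, by simp, by omega⟩
    · exact Or.inr ⟨s.1, by simp, by omega⟩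
  · split_ifs with c1 c2 c3 <;>
      exact Or.inr ⟨x, by simp [hx], h3⟩

lemma sticky (l : List Int) : ∀ s, BadS s → finishA (loopP s l) = false := by
  induction l with
  | nil => intro s h; exact finish_false s h
  | cons b r ih =>
    intro s h
    cases r with
    | nil => exact finish_false s h
    | cons c r' => exact ih _ (sticky_step s (b - c) h)

lemma natAbs_one_cases (d : Int) (h : d.natAbs = 1) : d = 1 ∨ d = -1 := by omega

lemma altD_cons (d b c : Int) (r : List Int) :
    altD d (b :: c :: r) = if d.natAbs = 1 ∧ d = b - c then false else altD (b - c) (c :: r) :=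
  rfl

lemma good (r : List Int) : ∀ (b d : Int) (temp : List Int), (∀ x ∈ temp, x < 3) →
    finishA (loopP (mkS d temp) (b :: r)) = altD d (b :: r) := by
  induction r with
  | nil =>
    intro b d temp htemp
    show finishA (mkS d temp) = true
    unfold finishA mkS
    simp only [List.all_append, List.all_cons, List.all_nil, Bool.and_eq_true, List.all_eq_true,
      decide_eq_true_eq, and_true]
    refine ⟨fun x hx => htemp x hx, ?_⟩
    split_ifs <;> omega
  | cons c r' ih =>
    intro b d temp htemp
    show finishA (loopP (stepD (mkS d temp) (b - c)) (c :: r')) = altD d (b :: c :: r')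
    rw [altD_cons]
    by_cases hbad : d.natAbs = 1 ∧ d = b - c
    · -- A's increment branch fires: count becomes 3, which is sticky-false; B is false too
      obtain ⟨hb1, hb2⟩ := hbad
      have hres : (b - c).natAbs = 1 := hb2 ▸ hb1
      have hstep : stepD (mkS d temp) (b - c) = (3, true, temp, b - c) := by
        unfold stepD mkS
        rw [if_pos ⟨hres, by simp [hb1], by simp [hb2]⟩]
        simp [hb1]
      rw [hstep, sticky (c :: r') _ (Or.inl ⟨le_refl _, rfl⟩), if_pos ⟨hb1, hb2⟩]
    · -- clean step: the new state is again a clean state over the new difference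
      rw [if_neg hbad]
      by_cases h1 : (b - c).natAbs = 1
      · by_cases h2 : d.natAbs = 1
        · -- alternating ±1 diffs: A's third branch
          have hne : d ≠ b - c := fun h => hbad ⟨h2, h⟩
          have halt : (d = 1 ∧ b - c = -1) ∨ (d = -1 ∧ b - c = 1) := by
            rcases natAbs_one_cases d h2 with hd | hd <;>
              rcases natAbs_one_cases (b - c) h1 with hr | hr <;>
                first
                  | exact absurd (hd.trans hr.symm) hne
                  | exact Or.inl ⟨hd, hr⟩
                  | exact Or.inr ⟨hd, hr⟩
          have hstep : stepD (mkS d temp) (b - c) = mkS (b - c) (temp ++ [2]) := by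
            unfold stepD mkS
            rw [if_neg (by rintro ⟨-, -, h⟩; exact hne (by simpa using h)),
              if_neg (by rintro ⟨-, h⟩; simp [h2] at h), if_pos (by simpa using halt)]
            simp [h1, h2]
          rw [hstep, ih c (b - c) (temp ++ [2])]
          intro x hx
          rcases List.mem_append.mp hx with hx | hx
          · exact htemp x hx
          · simp at hx; omega
        · -- previous diff was not ±1: A's second branch
          have hstep : stepD (mkS d temp) (b - c) = mkS (b - c) temp := by
            unfold stepD mkS
            rw [if_neg (by rintro ⟨-, h, -⟩; simp [h2] at h), if_pos ⟨h1, by simp [h2]⟩]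
            simp [h1]
          rw [hstep, ih c (b - c) temp htemp]
      · -- current diff not ±1: A's else branch
        have hno3 : ¬((d = 1 ∧ b - c = -1) ∨ (d = -1 ∧ b - c = 1)) := by
          rintro (⟨-, h⟩ | ⟨-, h⟩) <;> simp [h] at h1
        have hstep : stepD (mkS d temp) (b - c)
            = mkS (b - c) (temp ++ [if d.natAbs = 1 then 2 else 0]) := by
          unfold stepD mkS
          rw [if_neg (by rintro ⟨h, -⟩; exact h1 h), if_neg (by rintro ⟨h, -⟩; exact h1 h),
            if_neg (by simpa using hno3)]
          simp [h1]
        rw [hstep, ih c (b - c) _]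
        intro x hx
        rcases List.mem_append.mp hx with hx | hx
        · exact htemp x hx
        · simp at hx; subst hx; split_ifs <;> omega

lemma alt_cons (a b c : Int) (r : List Int) :
    is_shuffled_well_alt (a :: b :: c :: r)
      = ((!(decide ((a - b).natAbs = 1) && decide (a - b = b - c)))
          && is_shuffled_well_alt (b :: c :: r)) := by
  simp [is_shuffled_well_alt]

lemma alt_eq (r : List Int) : ∀ (a b : Int),
    is_shuffled_well_alt (a :: b :: r) = altD (a - b) (b :: r) := by
  induction r with
  | nil => intro a b; rfl
  | cons c r' ih =>
    intro a b
    rw [alt_cons, ih b c, altD_cons]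
    by_cases h : (a - b).natAbs = 1 ∧ a - b = b - c
    · obtain ⟨h1, h2⟩ := h
      rw [if_pos ⟨h1, h2⟩, decide_eq_true h1, decide_eq_true h2]
      rfl
    · rw [if_neg h]
      by_cases h1 : (a - b).natAbs = 1
      · have h2 : ¬(a - b = b - c) := fun h2 => h ⟨h1, h2⟩
        simp [h1, h2]
      · simp [h1]

lemma first_step (a b : Int) (r : List Int) :
    loopP ((0 : Int), false, ([] : List Int), (0 : Int)) (a :: b :: r)
      = loopP (mkS (a - b) (if (a - b).natAbs = 1 then [] else [0])) (b :: r) := by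
  show loopP (stepD ((0 : Int), false, [], (0 : Int)) (a - b)) (b :: r) = _
  by_cases h : (a - b).natAbs = 1
  · have hs : stepD ((0 : Int), false, [], (0 : Int)) (a - b) = mkS (a - b) [] := by
      unfold stepD mkS
      rw [if_neg (by rintro ⟨-, h, -⟩; simp at h), if_pos ⟨h, rfl⟩]
      simp [h]
    rw [hs, if_pos h]
  · have hno : ¬(((0 : Int) = 1 ∧ a - b = -1) ∨ ((0 : Int) = -1 ∧ a - b = 1)) := by
      rintro (⟨h0, -⟩ | ⟨h0, -⟩) <;> exact absurd h0 (by decide)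
    have hs : stepD ((0 : Int), false, [], (0 : Int)) (a - b) = mkS (a - b) [0] := by
      unfold stepD mkS
      rw [if_neg (by rintro ⟨h', -⟩; exact h h'), if_neg (by rintro ⟨h', -⟩; exact h h'),
        if_neg hno]
      simp [h]
    rw [hs, if_neg h]

lemma A_eq_finish (arr : List Int) :
    is_shuffled_well arr = finishA (loopP ((0 : Int), false, [], (0 : Int)) arr) := by
  have h := bridge arr arr 0 ((0 : Int), false, ([] : List Int), (0 : Int)) (by simp)
  simp only [Nat.cast_zero] at h
  show finishA ((PySem.List.pyRange 0 (arr.length : Int) 1).foldl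
    (stepA arr (arr.length : Int)) ((0 : Int), false, [], (0 : Int))) = _
  rw [h]

-- ===== VERDICT (by name: the statement is the Claim_ definition above) =====
theorem is_shuffled_well_spec : Claim_equal_is_shuffled_well := by
  intro arr _
  unfold Spec_is_shuffled_well
  rw [A_eq_finish]
  obtain - | ⟨a, - | ⟨b, r⟩⟩ := arr
  · rfl
  · rfl
  · rw [first_step, good r b (a - b) _ (by intro x hx; split_ifs at hx <;> simp_all),
      alt_eq r a b]
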